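-- pv_equiv track=rewrite | github.com/sadegh-dev/algorithms | zig_zag_iterator.py | zig_zag_iterator_1
-- ===== SOURCE A (Python) =====
-- def zig_zag_iterator_1(arr1, arr2) :
--     result = list()
--     for a1,a2 in zip(arr1, arr2):
--         result.append(a1)
--         result.append(a2)
--
--     diff_ = len(arr1) - len(arr2)
--     if diff_ > 0 :
--         result.extend(arr1[-diff_:])
--     elif diff_ < 0 :
--         result.extend(arr2[diff_:])
--
--     return result
-- ===== SOURCE B (Python) =====
-- from collections import deque
--
--
-- def zig_zag_iterator_1(arr1, arr2):
--     result = []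
--     dq = deque([iter(arr1), iter(arr2)])
--     while dq:
--         it = dq.popleft()
--         try:
--             result.append(next(it))
--         except StopIteration:
--             continue
--         dq.append(it)
--     return result
-- ===== Notes on version B (the rewrite author's own statement) =====
-- stated objective: idiomatic
-- what changed: Replaces the zip phase plus length-difference slice-tail phase with a single round-robin loop over a deque of the two iterators, dropping an iterator when it is exhausted.
import Mathlib
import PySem

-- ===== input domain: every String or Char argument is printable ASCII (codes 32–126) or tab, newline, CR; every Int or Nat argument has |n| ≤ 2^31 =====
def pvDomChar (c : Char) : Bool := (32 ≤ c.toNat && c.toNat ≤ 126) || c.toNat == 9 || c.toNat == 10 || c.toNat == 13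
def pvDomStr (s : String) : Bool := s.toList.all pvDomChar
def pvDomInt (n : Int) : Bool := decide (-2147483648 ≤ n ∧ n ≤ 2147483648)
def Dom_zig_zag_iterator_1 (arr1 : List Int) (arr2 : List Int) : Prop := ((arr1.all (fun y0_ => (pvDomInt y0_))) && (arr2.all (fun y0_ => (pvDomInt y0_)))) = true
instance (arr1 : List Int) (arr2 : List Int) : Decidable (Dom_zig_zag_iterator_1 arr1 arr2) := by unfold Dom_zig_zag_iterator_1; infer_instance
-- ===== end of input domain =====

-- B replaces A's zip-then-slice-tail structure with a single deque round-robin over the two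
-- iterators (objective: more idiomatic).

-- ===== PORT A =====
-- zip loop appending a1 then a2, then extend with the longer list's tail via a negative slice
def zig_zag_iterator_1 (arr1 : List Int) (arr2 : List Int) : List Int :=
  let result := (arr1.zip arr2).foldl (fun r (p : Int × Int) => r ++ [p.1] ++ [p.2]) []
  let diff : Int := PySem.List.len arr1 - PySem.List.len arr2
  if diff > 0 then result ++ PySem.List.slice arr1 (some (-diff)) none
  else if diff < 0 then result ++ PySem.List.slice arr2 (some diff) none
  else result

-- ===== PORT B =====
-- the deque loop: pop the front iterator, emit its head, push its rest to the back;
-- an exhausted iterator is dropped, leaving the survivor to drain in order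
def pvRoundRobin (xs ys : List Int) : List Int :=
  match xs with
  | [] => ys
  | x :: xs' => x :: pvRoundRobin ys xs'
termination_by xs.length + ys.length
decreasing_by simp; omega

def zig_zag_iterator_1_alt (arr1 : List Int) (arr2 : List Int) : List Int :=
  pvRoundRobin arr1 arr2

-- ===== PRECONDITION & SPEC =====
def Spec_zig_zag_iterator_1 (arr1 : List Int) (arr2 : List Int) (out : List Int) : Prop := out = zig_zag_iterator_1_alt arr1 arr2
instance (arr1 : List Int) (arr2 : List Int) (out : List Int) : Decidable (Spec_zig_zag_iterator_1 arr1 arr2 out) := by unfold Spec_zig_zag_iterator_1; infer_instance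

-- ===== CLAIM (what is proved, stated in full; the proofs are below) =====
def Claim_equal_zig_zag_iterator_1 : Prop := ∀ (arr1 : List Int) (arr2 : List Int), Dom_zig_zag_iterator_1 arr1 arr2 → Spec_zig_zag_iterator_1 arr1 arr2 (zig_zag_iterator_1 arr1 arr2)

-- ===== LEMMAS AND PROOFS =====

lemma pvFold (l : List (Int × Int)) (init : List Int) :
    l.foldl (fun r (p : Int × Int) => r ++ [p.1] ++ [p.2]) init
      = init ++ l.flatMap (fun p => [p.1, p.2]) := by
  induction l generalizing init with
  | nil => simp
  | cons p t ih => simp [List.foldl, List.flatMap_def]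

lemma pvSliceAll (xs : List Int) : PySem.List.slice xs (some (-(xs.length : Int))) none = xs := by
  cases xs with
  | nil => rfl
  | cons x t =>
      rw [PySem.List.slice_from_neg_natCast _ _ (by simp)]
      simp

lemma pvA_nil_left (ys : List Int) : zig_zag_iterator_1 [] ys = ys := by
  cases ys with
  | nil => rfl
  | cons y t =>
      simp only [zig_zag_iterator_1, List.zip_nil_left, List.foldl_nil, PySem.List.len_eq]
      have hl : (0 : Int) < ↑(y :: t).length := by exact_mod_cast Nat.succ_pos t.length
      have e : (↑(List.length ([] : List Int)) : Int) - ↑(y :: t).length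
          = -(((y :: t).length : Int)) := by simp
      rw [e, if_neg (by omega), if_pos (by omega), pvSliceAll]
      simp

lemma pvA_nil_right (xs : List Int) : zig_zag_iterator_1 xs [] = xs := by
  cases xs with
  | nil => rfl
  | cons x t =>
      simp only [zig_zag_iterator_1, List.zip_nil_right, List.foldl_nil, PySem.List.len_eq]
      have hl : (0 : Int) < ↑(x :: t).length := by exact_mod_cast Nat.succ_pos t.length
      have e : (↑(x :: t).length : Int) - ↑(List.length ([] : List Int))
          = ((x :: t).length : Int) := by simp
      rw [e, if_pos (by omega), pvSliceAll]
      simp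

lemma pvA_cons_cons (x y : Int) (xs ys : List Int) :
    zig_zag_iterator_1 (x :: xs) (y :: ys) = x :: y :: zig_zag_iterator_1 xs ys := by
  simp only [zig_zag_iterator_1, List.zip_cons_cons, PySem.List.len_eq, pvFold,
    List.foldl_cons, List.nil_append]
  have hdiff : ((↑(x :: xs).length : Int) - ↑(y :: ys).length) = (↑xs.length : Int) - ↑ys.length := by
    push_cast [List.length_cons]; ring
  rw [hdiff]
  by_cases hgt : ((↑xs.length : Int) - ↑ys.length) > 0
  · have hlen : ys.length < xs.length := by omega
    rw [if_pos hgt, if_pos hgt]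
    have hk : -((↑xs.length : Int) - ↑ys.length) = -(((xs.length - ys.length : Nat) : Int)) := by
      push_cast [Nat.cast_sub (le_of_lt hlen)]; ring
    rw [hk, PySem.List.slice_from_neg_natCast _ _ (by omega),
        PySem.List.slice_from_neg_natCast _ _ (by omega)]
    have h1 : (x :: xs).length - (xs.length - ys.length) = ys.length + 1 := by
      simp only [List.length_cons]; omega
    have h2 : xs.length - (xs.length - ys.length) = ys.length := by omega
    rw [h1, h2]
    simp
  · by_cases hlt : ((↑xs.length : Int) - ↑ys.length) < 0
    · have hlen : xs.length < ys.length := by omega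
      rw [if_neg hgt, if_neg hgt, if_pos hlt, if_pos hlt]
      have hk : ((↑xs.length : Int) - ↑ys.length) = -(((ys.length - xs.length : Nat) : Int)) := by
        push_cast [Nat.cast_sub (le_of_lt hlen)]; ring
      rw [hk, PySem.List.slice_from_neg_natCast _ _ (by omega),
          PySem.List.slice_from_neg_natCast _ _ (by omega)]
      have h1 : (y :: ys).length - (ys.length - xs.length) = xs.length + 1 := by
        simp only [List.length_cons]; omega
      have h2 : ys.length - (ys.length - xs.length) = xs.length := by omega
      rw [h1, h2]
      simp
    · rw [if_neg hgt, if_neg hgt, if_neg hlt, if_neg hlt]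
      simp

lemma pvRR_nil_right (xs : List Int) : pvRoundRobin xs [] = xs := by
  cases xs with
  | nil => simp [pvRoundRobin]
  | cons x t => simp [pvRoundRobin]

lemma pvRR_cons_cons (x y : Int) (xs ys : List Int) :
    pvRoundRobin (x :: xs) (y :: ys) = x :: y :: pvRoundRobin xs ys := by
  rw [pvRoundRobin, pvRoundRobin]

lemma pvMain (xs ys : List Int) : zig_zag_iterator_1 xs ys = pvRoundRobin xs ys := by
  induction xs generalizing ys with
  | nil => rw [pvA_nil_left]; simp [pvRoundRobin]
  | cons x t ih =>
      cases ys with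
      | nil => rw [pvA_nil_right, pvRR_nil_right]
      | cons y u => rw [pvA_cons_cons, pvRR_cons_cons, ih]

-- ===== VERDICT (by name: the statement is the Claim_ definition above) =====
theorem zig_zag_iterator_1_spec : Claim_equal_zig_zag_iterator_1 := by
  intro arr1 arr2 _
  unfold Spec_zig_zag_iterator_1 zig_zag_iterator_1_alt
  exact pvMain arr1 arr2
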